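-- pv_equiv track=rewrite | github.com/CX4Life/wwu-hax | history_to_train.py | winner_one
-- ===== SOURCE A (Python) =====
-- def winner_one(list_of_states):
--     ret = []
--     for state in list_of_states:
--         new_state = ','.join([x if x != '1' else '-1' for x in state])
--         new_state = ''.join([x if x != '3' else '1' for x in new_state])
--         new_state = ''.join([x if x != '2' else '-3' for x in new_state])
--         new_state = ''.join([x if x != '4' else '3' for x in new_state])
--         ret.append(new_state + '\n')
--     return ret
-- ===== SOURCE B (Python) =====
-- def winner_one(list_of_states):
--     m = {'1': '-1', '2': '-3', '3': '1', '4': '3'}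
--     return [','.join(m.get(c, c) for c in state) + '\n' for state in list_of_states]
-- ===== Notes on version B (the rewrite author's own statement) =====
-- stated objective: simpler
-- what changed: Replaces A's four sequential full-string substitution passes (each join/rebuild of the whole string) with one precomputed relabeling table applied in a single comma-joining pass per state.
import Mathlib
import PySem

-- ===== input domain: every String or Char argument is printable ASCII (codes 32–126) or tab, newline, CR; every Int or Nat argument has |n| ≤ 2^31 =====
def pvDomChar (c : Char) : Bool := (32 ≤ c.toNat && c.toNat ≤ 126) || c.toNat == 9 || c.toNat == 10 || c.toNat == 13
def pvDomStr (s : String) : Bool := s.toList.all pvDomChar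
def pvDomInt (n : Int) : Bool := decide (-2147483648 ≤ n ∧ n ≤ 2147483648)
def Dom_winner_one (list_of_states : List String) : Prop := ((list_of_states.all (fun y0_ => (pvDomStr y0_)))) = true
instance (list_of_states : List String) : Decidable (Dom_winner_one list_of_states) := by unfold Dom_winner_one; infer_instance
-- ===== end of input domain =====

-- B replaces A's four sequential per-character substitution passes with a single
-- table-driven pass per state (objective: simpler; same observable behaviour).

-- ===== PORT A =====
-- the loop body of A: four chained substitution passes, then append state + '\n'
def pvBodyA (ret : List String) (state : String) : List String :=
  let s1 := PySem.Str.join "," (state.toList.map (fun x => if x ≠ '1' then String.ofList [x] else "-1"))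
  let s2 := PySem.Str.join "" (s1.toList.map (fun x => if x ≠ '3' then String.ofList [x] else "1"))
  let s3 := PySem.Str.join "" (s2.toList.map (fun x => if x ≠ '2' then String.ofList [x] else "-3"))
  let s4 := PySem.Str.join "" (s3.toList.map (fun x => if x ≠ '4' then String.ofList [x] else "3"))
  ret ++ [s4 ++ "\n"]

def winner_one (list_of_states : List String) : List String :=
  list_of_states.foldl pvBodyA []

-- ===== PORT B =====
-- the relabeling table m of Source B
def pvTableB : PySem.Dict Char String :=
  PySem.Dict.ofList [('1', "-1"), ('2', "-3"), ('3', "1"), ('4', "3")]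

-- one state: ','.join(m.get(c, c) for c in state) + '\n'
def pvRelabel (state : String) : String :=
  PySem.Str.join "," (state.toList.map (fun c => pvTableB.getD c (String.ofList [c]))) ++ "\n"

def winner_one_alt (list_of_states : List String) : List String :=
  list_of_states.map pvRelabel

-- ===== PRECONDITION & SPEC =====
def Spec_winner_one (list_of_states : List String) (out : List String) : Prop := out = winner_one_alt list_of_states
instance (list_of_states : List String) (out : List String) : Decidable (Spec_winner_one list_of_states out) := by unfold Spec_winner_one; infer_instance

-- ===== CLAIM (what is proved, stated in full; the proofs are below) =====
def Claim_equal_winner_one : Prop := ∀ (list_of_states : List String), Dom_winner_one list_of_states → Spec_winner_one list_of_states (winner_one list_of_states)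

-- ===== LEMMAS AND PROOFS =====

-- ''.join([x if x != t else r for x in cs]) at the char-list level
def pvStep (t : Char) (r : List Char) (cs : List Char) : List Char :=
  (cs.map (fun x => if x ≠ t then [x] else r)).flatten

theorem pvStep_fold (t : Char) (r : List Char) (L : List Char) :
    (L.map (fun x => if x ≠ t then [x] else r)).flatten = pvStep t r L := rfl

theorem pvStep_append (t : Char) (r : List Char) (a b : List Char) :
    pvStep t r (a ++ b) = pvStep t r a ++ pvStep t r b := by
  simp [pvStep]

theorem pvStep_join (t : Char) (r : List Char) (ht : t ≠ ',') (ps : List (List Char)) :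
    pvStep t r (PySem.Chars.join [','] ps) = PySem.Chars.join [','] (ps.map (pvStep t r)) := by
  induction ps with
  | nil => simp [PySem.Chars.join_nil, pvStep]
  | cons p ps ih =>
    cases ps with
    | nil => simp [PySem.Chars.join_singleton]
    | cons q qs =>
      rw [PySem.Chars.join_cons_cons, pvStep_append, pvStep_append, ih,
        show pvStep t r [','] = [','] by simp [pvStep, Ne.symm ht]]
      simp [PySem.Chars.join_cons_cons]

theorem pvJoinEmpty (ps : List (List Char)) : PySem.Chars.join [] ps = ps.flatten := by
  induction ps with
  | nil => simp [PySem.Chars.join_nil]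
  | cons p ps ih =>
    cases ps with
    | nil => simp [PySem.Chars.join_singleton]
    | cons q qs => rw [PySem.Chars.join_cons_cons, ih]; simp

-- the composition of A's four per-character substitutions is B's table lookup
theorem pvChar_eq (c : Char) :
    pvStep '4' ['3'] (pvStep '2' ['-', '3'] (pvStep '3' ['1']
      (if c ≠ '1' then [c] else ['-', '1']))) =
    (pvTableB.getD c (String.ofList [c])).toList := by
  have hmk : pvTableB = PySem.Dict.mk [('1', "-1"), ('2', "-3"), ('3', "1"), ('4', "3")] := rfl
  rw [hmk]
  by_cases h1 : c = '1'
  · subst h1; rfl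
  by_cases h2 : c = '2'
  · subst h2; rfl
  by_cases h3 : c = '3'
  · subst h3; rfl
  by_cases h4 : c = '4'
  · subst h4; rfl
  · simp [PySem.Dict.getD, pvStep, h1, h2, h3, h4,
      Ne.symm h1, Ne.symm h2, Ne.symm h3, Ne.symm h4, String.toList_ofList, PySem.Dict.get?]

-- A's chained passes on one state equal B's single table-driven pass
theorem pvString_eq (state : String) :
    PySem.Str.join "" (((PySem.Str.join "" (((PySem.Str.join "" (((PySem.Str.join "," (state.toList.map (fun x => if x ≠ '1' then String.ofList [x] else "-1"))).toList).map (fun x => if x ≠ '3' then String.ofList [x] else "1"))).toList).map (fun x => if x ≠ '2' then String.ofList [x] else "-3"))).toList).map (fun x => if x ≠ '4' then String.ofList [x] else "3"))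
    = PySem.Str.join "," (state.toList.map (fun c => pvTableB.getD c (String.ofList [c]))) := by
  rw [← String.toList_inj]
  simp only [PySem.Str.toList_join, List.map_map, Function.comp_def,
    show ("" : String).toList = [] from rfl, show ("," : String).toList = [','] from rfl]
  simp only [apply_ite String.toList, String.toList_ofList,
    show ("-1" : String).toList = ['-', '1'] from rfl,
    show ("1" : String).toList = ['1'] from rfl,
    show ("-3" : String).toList = ['-', '3'] from rfl,
    show ("3" : String).toList = ['3'] from rfl]
  simp only [pvJoinEmpty, pvStep_fold]
  rw [pvStep_join '3' ['1'] (by decide), pvStep_join '2' ['-', '3'] (by decide),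
    pvStep_join '4' ['3'] (by decide)]
  simp only [List.map_map, Function.comp_def]
  apply congrArg
  apply List.map_congr_left
  intro c _
  exact pvChar_eq c

theorem pvBody_eq (ret : List String) (state : String) :
    pvBodyA ret state = ret ++ [pvRelabel state] := by
  simp only [pvBodyA]
  rw [pvString_eq]
  rfl

theorem pvFold (l : List String) (acc : List String) :
    l.foldl pvBodyA acc = acc ++ l.map pvRelabel := by
  induction l generalizing acc with
  | nil => simp
  | cons s l ih => simp [List.foldl_cons, pvBody_eq, ih]

-- ===== VERDICT (by name: the statement is the Claim_ definition above) =====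
theorem winner_one_spec : Claim_equal_winner_one := by
  intro l _
  unfold Spec_winner_one winner_one winner_one_alt
  rw [pvFold]
  simp
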